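-- pv_equiv track=rewrite | github.com/shibam120302/GFG_POTD | String rp or pr.py | solve
-- ===== SOURCE A (Python) =====
-- def solve (X, Y, S):
--     #code here
--     answer=0
--     a='pr'
--     b='rp'
--     if X<Y:
--         X,Y=Y,X
--         a,b=b,a
--     st=[]
--     for i in range(len(S)-1,-1,-1):
--         if len(st)>0 and S[i]==a[0] and st[-1]==a[1]:
--             st.pop(len(st)-1)
--             answer+=X
--         else:
--             st.append(S[i])
--     S=''
--     while len(st)>0:
--         S+=st[-1]
--         st.pop(len(st)-1)
--     for i in range(len(S)-1,-1,-1):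
--         if len(st)>0 and S[i]==b[0] and st[-1]==b[1]:
--             st.pop(len(st)-1)
--             answer+=Y
--         else:
--             st.append(S[i])
--     return answer
-- ===== SOURCE B (Python) =====
-- def solve(X, Y, S):
--     hi, lo = X, Y
--     first, second = 'p', 'r'
--     if X < Y:
--         hi, lo = Y, X
--         first, second = 'r', 'p'
--     matched = 0      # high-value pairs removed
--     low = 0          # low-value pairs (sum of per-run minima)
--     opens = 0        # unmatched `first` chars in the current p/r run
--     closes = 0       # unmatched `second` chars in the current p/r run
--     for c in S:
--         if c == first:
--             opens += 1
--         elif c == second: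
--             if opens > 0:
--                 opens -= 1
--                 matched += 1
--             else:
--                 closes += 1
--         else:
--             low += min(opens, closes)
--             opens = closes = 0
--     low += min(opens, closes)
--     return hi * matched + lo * low
-- ===== Notes on version B (the rewrite author's own statement) =====
-- stated objective: faster
-- what changed: Replaces A's two backward stack passes plus a character-by-character string rebuild with a single forward pass keeping four counters (unmatched opens/closes of the current p/r run, matched high pairs, accumulated low-pair minima flushed at every non-pair character).
import Mathlib
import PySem

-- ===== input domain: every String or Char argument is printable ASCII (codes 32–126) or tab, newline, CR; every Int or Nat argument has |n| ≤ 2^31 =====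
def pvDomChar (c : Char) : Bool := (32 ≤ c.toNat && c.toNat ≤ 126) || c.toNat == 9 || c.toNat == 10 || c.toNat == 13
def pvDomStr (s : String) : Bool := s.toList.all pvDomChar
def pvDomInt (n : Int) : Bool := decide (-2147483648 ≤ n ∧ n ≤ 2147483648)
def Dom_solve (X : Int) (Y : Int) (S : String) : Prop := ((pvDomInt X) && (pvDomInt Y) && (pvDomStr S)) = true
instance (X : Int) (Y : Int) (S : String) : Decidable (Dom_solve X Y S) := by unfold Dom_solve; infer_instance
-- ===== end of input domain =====

-- B replaces A's two backward stack passes (plus a character-by-character string rebuild) by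
-- one forward pass with four integer counters, flushing per-run minima at non-pair characters.

-- ===== PORT A =====
-- one backward-scan step of A's stack loop (Python stack modelled top-at-head:
-- st[-1] = head, append = cons, pop = tail); a pop adds the pair value v to answer
def solveStep (p q : Char) (v : Int) (c : Char) (acc : List Char × Int) : List Char × Int :=
  let (st, ans) := acc
  if 0 < st.length ∧ c = p ∧ st.head? = some q then (st.tail, ans + v) else (c :: st, ans)

-- the 'while len(st)>0: S += st[-1]; st.pop()' rebuild loop
def solveDrain (st : List Char) (acc : List Char) : List Char :=
  match st with
  | [] => acc
  | c :: rest => solveDrain rest (acc ++ [c])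

def solve (X : Int) (Y : Int) (S : String) : Int :=
  let (X', Y', a0, a1, b0, b1) :=
    if X < Y then (Y, X, 'r', 'p', 'p', 'r') else (X, Y, 'p', 'r', 'r', 'p')
  let (st, ans) := S.toList.foldr (solveStep a0 a1 X') ([], (0 : Int))
  let S2 := solveDrain st []
  let (_, ans2) := S2.foldr (solveStep b0 b1 Y') ([], ans)
  ans2

-- ===== PORT B =====
-- one forward step of B's counter loop: state (opens, closes, matched, low)
def solveAltStep (first second : Char) (s : Nat × Nat × Nat × Nat) (c : Char) :
    Nat × Nat × Nat × Nat :=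
  let (o, cl, m, lo) := s
  if c = first then (o + 1, cl, m, lo)
  else if c = second then
    (if 0 < o then (o - 1, cl, m + 1, lo) else (o, cl + 1, m, lo))
  else (0, 0, m, lo + min o cl)

def solve_alt (X : Int) (Y : Int) (S : String) : Int :=
  let (hi, lov, first, second) :=
    if X < Y then (Y, X, 'r', 'p') else (X, Y, 'p', 'r')
  let (o, cl, m, lo) := S.toList.foldl (solveAltStep first second) (0, 0, 0, 0)
  hi * (m : Int) + lov * ((lo + min o cl : Nat) : Int)

-- ===== PRECONDITION & SPEC =====
def Spec_solve (X : Int) (Y : Int) (S : String) (out : Int) : Prop := out = solve_alt X Y S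
instance (X : Int) (Y : Int) (S : String) (out : Int) : Decidable (Spec_solve X Y S out) := by unfold Spec_solve; infer_instance

-- ===== CLAIM (what is proved, stated in full; the proofs are below) =====
def Claim_equal_solve : Prop := ∀ (X : Int) (Y : Int) (S : String), Dom_solve X Y S → Spec_solve X Y S (solve X Y S)

-- ===== LEMMAS AND PROOFS =====

-- A's full answer (both passes, pair (p,q) worth hv then pair (q,p) worth lv) on a char list
def ansA (p q : Char) (hv lv : Int) (s : List Char) : Int :=
  ((s.foldr (solveStep p q hv) ([], (0 : Int))).1.foldr (solveStep q p lv)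
    ([], (s.foldr (solveStep p q hv) ([], (0 : Int))).2)).2

-- B's final expression as a function of the loop state
def ansB (hv lv : Int) (st : Nat × Nat × Nat × Nat) : Int :=
  hv * (st.2.2.1 : Int) + lv * ((st.2.2.2 + min st.1 st.2.1 : Nat) : Int)

theorem drain_eq (st acc : List Char) : solveDrain st acc = acc ++ st := by
  induction st generalizing acc with
  | nil => simp [solveDrain]
  | cons c rest ih => simp [solveDrain, ih]

theorem step_pop (p q : Char) (v : Int) (st : List Char) (n : Int) :
    solveStep p q v p (q :: st, n) = (st, n + v) := by
  simp [solveStep]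

theorem step_push_c (p q c : Char) (v : Int) (hc : c ≠ p) (st : List Char) (n : Int) :
    solveStep p q v c (st, n) = (c :: st, n) := by
  simp [solveStep, hc]

theorem step_push_s (p q c : Char) (v : Int) (st : List Char) (hs : st.head? ≠ some q) (n : Int) :
    solveStep p q v c (st, n) = (c :: st, n) := by
  simp only [solveStep]
  rw [if_neg]
  rintro ⟨-, -, h2⟩
  exact hs h2

-- the answer accumulator is additive
theorem foldr_add (p q : Char) (v : Int) (s : List Char) (st : List Char) (n d : Int) :
    s.foldr (solveStep p q v) (st, n + d)
      = ((s.foldr (solveStep p q v) (st, n)).1, (s.foldr (solveStep p q v) (st, n)).2 + d) := by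
  induction s with
  | nil => simp
  | cons c t ih =>
      simp only [List.foldr_cons, ih, solveStep]
      split_ifs
      · simp; ring
      · simp

-- a run of a char that is not the pop char always pushes
theorem foldr_push (p q ch : Char) (v : Int) (h : ch ≠ p) (j : Nat) (st : List Char) (n : Int) :
    (List.replicate j ch).foldr (solveStep p q v) (st, n) = (List.replicate j ch ++ st, n) := by
  induction j with
  | zero => simp
  | succ k ih => simp [List.replicate_succ, ih, solveStep, h]

-- a run of j pop-chars p against a stack with L leading q's cancels min j L pairs
theorem foldr_run (p q : Char) (hpq : p ≠ q) (v : Int) (j L : Nat) (r : List Char)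
    (hr : r.head? ≠ some q) (n : Int) :
    (List.replicate j p).foldr (solveStep p q v) (List.replicate L q ++ r, n)
      = (List.replicate (L - j) q ++ List.replicate (j - L) p ++ r, n + v * (min j L : Nat)) := by
  induction j with
  | zero => simp
  | succ k ih =>
      rw [List.replicate_succ, List.foldr_cons, ih]
      rcases Nat.lt_or_ge k L with h | h
      · have h1 : L - k = (L - (k + 1)) + 1 := by omega
        rw [h1, List.replicate_succ]
        simp only [List.cons_append, List.append_assoc]
        rw [step_pop]
        have h2 : min (k + 1) L = min k L + 1 := by omega
        have h3 : k - L = 0 := by omega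
        have h4 : (k + 1) - L = 0 := by omega
        simp only [h2, h3, h4, Prod.mk.injEq, List.replicate_zero,
          List.nil_append, true_and]
        push_cast; ring
      · have hhead : (List.replicate (L - k) q ++ List.replicate (k - L) p ++ r).head? ≠ some q := by
          have h1 : L - k = 0 := by omega
          cases hkL : k - L with
          | zero => simpa [h1] using hr
          | succ m => simp [h1, List.replicate_succ, hpq]
        rw [step_push_s p q p v _ hhead]
        have h1 : L - k = 0 := by omega
        have h2 : L - (k + 1) = 0 := by omega
        have h3 : min k L = L := by omega
        have h4 : min (k + 1) L = L := by omega
        have h5 : (k + 1) - L = (k - L) + 1 := by omega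
        simp [h1, h2, h3, h4, h5, List.replicate_succ]

-- a run of pop-chars onto a stack without leading q's just pushes
theorem foldr_run0 (p q : Char) (hpq : p ≠ q) (v : Int) (j : Nat) (r : List Char)
    (hr : r.head? ≠ some q) (n : Int) :
    (List.replicate j p).foldr (solveStep p q v) (r, n) = (List.replicate j p ++ r, n) := by
  have := foldr_run p q hpq v j 0 r hr n
  simpa using this

-- every char list splits off its leading run of q's
theorem split_leading (q : Char) (l : List Char) :
    ∃ L r, l = List.replicate L q ++ r ∧ r.head? ≠ some q := by
  induction l with
  | nil => exact ⟨0, [], by simp, by simp⟩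
  | cons c t ih =>
      rcases ih with ⟨L, r, heq, hr⟩
      by_cases hc : c = q
      · exact ⟨L + 1, r, by simp [List.replicate_succ, heq, hc], hr⟩
      · exact ⟨0, c :: t, by simp, by simp [hc]⟩

-- reduction lemmas for B's step
theorem alt_first (f s' : Char) (o cl m lo : Nat) :
    solveAltStep f s' (o, cl, m, lo) f = (o + 1, cl, m, lo) := by
  simp [solveAltStep]

theorem alt_second_pos (f s' : Char) (h : f ≠ s') (o cl m lo : Nat) (ho : 0 < o) :
    solveAltStep f s' (o, cl, m, lo) s' = (o - 1, cl, m + 1, lo) := by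
  simp [solveAltStep, Ne.symm h, ho]

theorem alt_second_zero (f s' : Char) (h : f ≠ s') (cl m lo : Nat) :
    solveAltStep f s' (0, cl, m, lo) s' = (0, cl + 1, m, lo) := by
  simp [solveAltStep, Ne.symm h]

theorem alt_other (f s' c : Char) (h1 : c ≠ f) (h2 : c ≠ s') (o cl m lo : Nat) :
    solveAltStep f s' (o, cl, m, lo) c = (0, 0, m, lo + min o cl) := by
  simp [solveAltStep, h1, h2]

-- key invariant: B's loop from any run state equals hv·m + lv·lo + A's answer on the
-- string with the pending run (q^cl p^o) prepended
theorem main_inv (p q : Char) (hpq : p ≠ q) (hv lv : Int) (s : List Char) :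
    ∀ (o cl m lo : Nat),
      ansB hv lv (s.foldl (solveAltStep p q) (o, cl, m, lo))
        = hv * m + lv * lo + ansA p q hv lv (List.replicate cl q ++ List.replicate o p ++ s) := by
  induction s with
  | nil =>
      intro o cl m lo
      have h1 : (List.replicate o p).foldr (solveStep p q hv) (([], (0 : Int)) : List Char × Int)
          = (List.replicate o p, 0) := by
        simpa using foldr_run0 p q hpq hv o [] (by simp) 0
      have h2 : (List.replicate cl q ++ List.replicate o p).foldr (solveStep p q hv)
            (([], (0 : Int)) : List Char × Int)
          = (List.replicate cl q ++ List.replicate o p, 0) := by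
        rw [List.foldr_append, h1, foldr_push p q q hv (Ne.symm hpq) cl]
      have h3 : (List.replicate o p).foldr (solveStep q p lv) (([], (0 : Int)) : List Char × Int)
          = (List.replicate o p, 0) := by
        simpa using foldr_push q p p lv hpq o [] 0
      have h4 := foldr_run q p (Ne.symm hpq) lv cl o [] (by simp) 0
      simp only [List.append_nil] at h4
      unfold ansA
      simp only [List.foldl_nil, List.append_nil, h2]
      rw [List.foldr_append, h3, h4]
      simp only [ansB]
      push_cast [Nat.min_comm o cl]
      ring
  | cons c t ih =>
      intro o cl m lo
      rw [List.foldl_cons]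
      rcases hT : t.foldr (solveStep p q hv) (([], (0 : Int)) : List Char × Int) with ⟨N, A⟩
      by_cases hcp : c = p
      · subst hcp
        rw [alt_first, ih (o + 1) cl m lo]
        have he : List.replicate cl q ++ List.replicate (o + 1) c ++ t
            = List.replicate cl q ++ List.replicate o c ++ c :: t := by
          simp [List.replicate_succ', List.append_assoc]
        rw [he]
      · by_cases hcq : c = q
        · subst hcq
          by_cases ho : 0 < o
          · obtain ⟨k, rfl⟩ : ∃ k, o = k + 1 := ⟨o - 1, by omega⟩
            rw [alt_second_pos p c (by exact hpq) _ cl m lo ho, Nat.add_sub_cancel,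
              ih k cl (m + 1) lo]
            -- show ansA (q^cl p^(k+1) q::t) = hv + ansA (q^cl p^k t)
            rcases split_leading c N with ⟨L, r, hN, hr⟩
            have hqt : (c :: t).foldr (solveStep p c hv) (([], (0 : Int)) : List Char × Int)
                = (List.replicate (L + 1) c ++ r, A) := by
              rw [List.foldr_cons, hT, step_push_c p c c hv hcp, hN]
              simp [List.replicate_succ]
            have lhs1 : (List.replicate cl c ++ List.replicate (k + 1) p ++ c :: t).foldr
                  (solveStep p c hv) (([], (0 : Int)) : List Char × Int)
                = (List.replicate cl c ++ (List.replicate (L - k) c ++ List.replicate (k - L) p ++ r),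
                   A + hv * ((min k L : Nat) : Int) + hv) := by
              rw [List.foldr_append, List.foldr_append, hqt,
                foldr_run p c hpq hv (k + 1) (L + 1) r hr A,
                foldr_push p c c hv (Ne.symm hpq) cl]
              have e1 : L + 1 - (k + 1) = L - k := by omega
              have e2 : k + 1 - (L + 1) = k - L := by omega
              have e3 : (min (k + 1) (L + 1)) = min k L + 1 := by omega
              simp only [e1, e2, e3, Prod.mk.injEq, true_and]
              push_cast; ring
            have rhs1 : (List.replicate cl c ++ List.replicate k p ++ t).foldr
                  (solveStep p c hv) (([], (0 : Int)) : List Char × Int)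
                = (List.replicate cl c ++ (List.replicate (L - k) c ++ List.replicate (k - L) p ++ r),
                   A + hv * ((min k L : Nat) : Int)) := by
              rw [List.foldr_append, List.foldr_append, hT, hN,
                foldr_run p c hpq hv k L r hr A,
                foldr_push p c c hv (Ne.symm hpq) cl]
            unfold ansA
            rw [lhs1, rhs1]
            simp only []
            rw [foldr_add c p lv _ [] (A + hv * ((min k L : Nat) : Int)) hv]
            push_cast
            ring
          · have ho0 : o = 0 := by omega
            subst ho0
            rw [alt_second_zero p c (by exact hpq) cl m lo, ih 0 (cl + 1) m lo]
            have he : List.replicate (cl + 1) c ++ List.replicate 0 p ++ t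
                = List.replicate cl c ++ List.replicate 0 p ++ c :: t := by
              simp [List.replicate_succ', List.append_assoc]
            rw [he]
        · -- barrier character: flush the run
          rw [alt_other p q c hcp hcq, ih 0 0 m (lo + min o cl)]
          simp only [List.replicate_zero, List.nil_append]
          have hct : (c :: t).foldr (solveStep p q hv) (([], (0 : Int)) : List Char × Int)
              = (c :: N, A) := by
            rw [List.foldr_cons, hT, step_push_c p q c hv hcp]
          have lhs1 : (List.replicate cl q ++ List.replicate o p ++ c :: t).foldr
                (solveStep p q hv) (([], (0 : Int)) : List Char × Int)
              = (List.replicate cl q ++ List.replicate o p ++ c :: N, A) := by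
            rw [List.foldr_append, List.foldr_append, hct,
              foldr_run0 p q hpq hv o (c :: N) (by simp [hcq]) A,
              foldr_push p q q hv (Ne.symm hpq) cl]
            simp [List.append_assoc]
          have key : ansA p q hv lv (List.replicate cl q ++ List.replicate o p ++ c :: t)
              = lv * ((min o cl : Nat) : Int) + ansA p q hv lv t := by
            unfold ansA
            rw [lhs1, hT]
            simp only []
            rcases hP : N.foldr (solveStep q p lv) (([], A) : List Char × Int) with ⟨N2, A2⟩
            rw [List.foldr_append, List.foldr_append, List.foldr_cons, hP,
              step_push_c q p c lv hcq,
              foldr_push q p p lv hpq o,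
              foldr_run q p (Ne.symm hpq) lv cl o (c :: N2) (by simp [hcp]) A2]
            simp only []
            push_cast [Nat.min_comm o cl]
            ring
          rw [key]
          push_cast
          ring

-- B's final expression at the initial state equals A's answer
theorem main_eq (p q : Char) (hpq : p ≠ q) (hv lv : Int) (s : List Char) :
    ansB hv lv (s.foldl (solveAltStep p q) (0, 0, 0, 0)) = ansA p q hv lv s := by
  have := main_inv p q hpq hv lv s 0 0 0 0
  simpa using this

-- ===== VERDICT (by name: the statement is the Claim_ definition above) =====
theorem solve_spec : Claim_equal_solve := by
  intro X Y S _
  unfold Spec_solve solve solve_alt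
  by_cases h : X < Y
  · simp only [if_pos h]
    have hm := main_eq 'r' 'p' (by decide) Y X S.toList
    unfold ansA at hm
    rw [drain_eq]
    rcases hfold : S.toList.foldl (solveAltStep 'r' 'p') (0, 0, 0, 0) with ⟨o, cl, m, lo⟩
    rw [hfold] at hm
    rcases h1 : S.toList.foldr (solveStep 'r' 'p' Y) ([], (0 : Int)) with ⟨st1, a1⟩
    rw [h1] at hm
    simp only [ansB, List.nil_append] at hm ⊢
    exact hm.symm
  · simp only [if_neg h]
    have hm := main_eq 'p' 'r' (by decide) X Y S.toList
    unfold ansA at hm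
    rw [drain_eq]
    rcases hfold : S.toList.foldl (solveAltStep 'p' 'r') (0, 0, 0, 0) with ⟨o, cl, m, lo⟩
    rw [hfold] at hm
    rcases h1 : S.toList.foldr (solveStep 'p' 'r' X) ([], (0 : Int)) with ⟨st1, a1⟩
    rw [h1] at hm
    simp only [ansB, List.nil_append] at hm ⊢
    exact hm.symm
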